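-- pv_equiv track=rewrite | github.com/jaaacki/adaMedical_Backend | app/auth/permissions.py | expand_permissions
-- ===== SOURCE A (Python) =====
-- def expand_permissions(permission_patterns):
--     """Expand permission patterns like '*.view' to individual permissions."""
--     all_permissions = [
--         f'{resource}.{action}' for resource in
--         ['users', 'products', 'inventory', 'orders', 'invoices', 'contacts', 'organizations', 'payments']
--         for action in ['view', 'edit', 'create', 'delete']
--     ]
--
--     expanded = set()
--     for pattern in permission_patterns:
--         if pattern == '*.*':
--             # All permissions
--             expanded.update(all_permissions)
--         elif pattern.endswith('.*'):
--             # All actions for a resource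
--             resource = pattern.split('.')[0]
--             expanded.update([p for p in all_permissions if p.startswith(f'{resource}.')])
--         elif pattern.startswith('*.'):
--             # One action for all resources
--             action = pattern.split('.')[1]
--             expanded.update([p for p in all_permissions if p.endswith(f'.{action}')])
--         else:
--             # Specific permission
--             expanded.add(pattern)
--
--     return expanded
-- ===== SOURCE B (Python) =====
-- def expand_permissions(permission_patterns):
--     """Expand permission patterns like '*.view' to individual permissions."""
--     resources = ['users', 'products', 'inventory', 'orders', 'invoices', 'contacts', 'organizations', 'payments']
--     actions = ['view', 'edit', 'create', 'delete']
--
--     def expand_one(pattern):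
--         if pattern == '*.*':
--             return [f'{r}.{a}' for r in resources for a in actions]
--         elif pattern.endswith('.*'):
--             resource = pattern.split('.')[0]
--             return [f'{resource}.{a}' for a in actions] if resource in resources else []
--         elif pattern.startswith('*.'):
--             action = pattern.split('.')[1]
--             return [f'{r}.{action}' for r in resources] if action in actions else []
--         else:
--             return [pattern]
--
--     return {p for pattern in permission_patterns for p in expand_one(pattern)}
-- ===== Notes on version B (the rewrite author's own statement) =====
-- stated objective: simpler
-- what changed: B replaces A's stateful loop over a prebuilt 32-element all_permissions list (with per-pattern filter scans and in-place set updates) by a pure per-pattern expander returning a small list -- guarded by membership in the resources/actions source lists -- whose results are collected by one flat set comprehension.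
import Mathlib
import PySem

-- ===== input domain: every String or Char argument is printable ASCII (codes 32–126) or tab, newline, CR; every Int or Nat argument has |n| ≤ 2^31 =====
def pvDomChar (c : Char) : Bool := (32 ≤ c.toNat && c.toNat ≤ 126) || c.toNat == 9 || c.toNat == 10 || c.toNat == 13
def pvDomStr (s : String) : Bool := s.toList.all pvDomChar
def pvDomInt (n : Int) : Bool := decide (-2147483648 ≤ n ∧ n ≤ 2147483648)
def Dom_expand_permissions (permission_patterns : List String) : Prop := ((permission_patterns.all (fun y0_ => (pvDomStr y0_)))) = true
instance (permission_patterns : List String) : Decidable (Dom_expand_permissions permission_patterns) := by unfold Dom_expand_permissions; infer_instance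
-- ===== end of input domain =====

-- B replaces A's stateful loop over a prebuilt 32-element all_permissions list (with per-pattern filter
-- scans and in-place set updates) by a pure per-pattern expander, guarded by membership in the small
-- source lists, whose results are collected by one flat set comprehension (objective: simpler).

-- ===== PORT A =====
-- all_permissions: the nested comprehension of A, resource-major order
def pvAllPermissions : List String :=
  (["users", "products", "inventory", "orders", "invoices", "contacts", "organizations", "payments"]).flatMap
    (fun resource => (["view", "edit", "create", "delete"]).map (fun action => resource ++ "." ++ action))

def expand_permissions (permission_patterns : List String) : List String :=
  permission_patterns.foldl (fun (expanded : PySem.Set String) pattern =>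
    if pattern = "*.*" then
      PySem.Set.update expanded pvAllPermissions
    else if PySem.Str.endswith pattern ".*" then
      -- pattern.split('.')[0]; split with a nonempty separator is never empty, so [0] = headD
      let resource := ((PySem.Str.split? pattern ".").getD []).headD ""
      PySem.Set.update expanded (pvAllPermissions.filter (fun p => PySem.Str.startswith p (resource ++ ".")))
    else if PySem.Str.startswith pattern "*." then
      -- pattern starts with "*.", so split('.') has at least 2 pieces and [1] = getD 1
      let action := ((PySem.Str.split? pattern ".").getD []).getD 1 ""
      PySem.Set.update expanded (pvAllPermissions.filter (fun p => PySem.Str.endswith p ("." ++ action)))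
    else
      PySem.Set.add expanded pattern) PySem.Set.empty

-- ===== PORT B =====
def pvResources : List String :=
  ["users", "products", "inventory", "orders", "invoices", "contacts", "organizations", "payments"]
def pvActions : List String := ["view", "edit", "create", "delete"]

-- B's pure helper expand_one: the (small) list of permissions one pattern contributes
def pvExpandOne (pattern : String) : List String :=
  if pattern = "*.*" then
    pvResources.flatMap (fun r => pvActions.map (fun a => r ++ "." ++ a))
  else if PySem.Str.endswith pattern ".*" then
    let resource := ((PySem.Str.split? pattern ".").getD []).headD ""
    if pvResources.contains resource then pvActions.map (fun a => resource ++ "." ++ a) else []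
  else if PySem.Str.startswith pattern "*." then
    let action := ((PySem.Str.split? pattern ".").getD []).getD 1 ""
    if pvActions.contains action then pvResources.map (fun r => r ++ "." ++ action) else []
  else [pattern]

-- the flat set comprehension {p for pattern in patterns for p in expand_one(pattern)}
def expand_permissions_alt (permission_patterns : List String) : List String :=
  PySem.Set.ofList (permission_patterns.flatMap pvExpandOne)

-- ===== PRECONDITION & SPEC =====
def Spec_expand_permissions (permission_patterns : List String) (out : List String) : Prop := out = expand_permissions_alt permission_patterns
instance (permission_patterns : List String) (out : List String) : Decidable (Spec_expand_permissions permission_patterns out) := by unfold Spec_expand_permissions; infer_instance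

-- ===== CLAIM (what is proved, stated in full; the proofs are below) =====
def Claim_equal_expand_permissions : Prop := ∀ (permission_patterns : List String), Dom_expand_permissions permission_patterns → Spec_expand_permissions permission_patterns (expand_permissions permission_patterns)

-- ===== LEMMAS AND PROOFS =====

-- a dot-terminated prefix of r.a (r, a dot-free) determines r
lemma pv_pfx_dot (s r a : List Char) (hr : '.' ∉ r) (ha : '.' ∉ a)
    (h : (s ++ ['.']) <+: (r ++ '.' :: a)) : s = r := by
  induction s generalizing r with
  | nil =>
    cases r with
    | nil => rfl
    | cons c r' =>
      rw [List.nil_append, List.cons_append, List.cons_prefix_cons] at h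
      exact absurd (h.1 ▸ List.mem_cons_self) hr
  | cons c s' ih =>
    cases r with
    | nil =>
      rw [List.cons_append, List.nil_append, List.cons_prefix_cons] at h
      obtain ⟨rfl, h2⟩ := h
      obtain ⟨t, ht⟩ := h2
      exact absurd (ht ▸ (List.mem_append_left t (List.mem_append_right s' List.mem_cons_self))) ha
    | cons d r' =>
      rw [List.cons_append, List.cons_append, List.cons_prefix_cons] at h
      have hr' : '.' ∉ r' := fun hm => hr (List.mem_cons_of_mem d hm)
      exact h.1 ▸ congrArg (c :: ·) (ih r' hr' h.2)

-- a dot-led suffix of r.a (r, a dot-free) determines a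
lemma pv_sfx_dot (t r a : List Char) (hr : '.' ∉ r) (ha : '.' ∉ a)
    (h : ('.' :: t) <:+ (r ++ '.' :: a)) : t = a := by
  have h' : (t.reverse ++ ['.']) <+: (a.reverse ++ '.' :: r.reverse) := by
    simpa [List.reverse_append] using List.reverse_prefix.mpr h
  have := pv_pfx_dot t.reverse a.reverse r.reverse (by simpa using ha) (by simpa using hr) h'
  simpa using congrArg List.reverse this

lemma pv_res_dotfree (r : String) (hr : r ∈ pvResources) : '.' ∉ r.toList := by
  fin_cases hr <;> decide

lemma pv_act_dotfree (a : String) (ha : a ∈ pvActions) : '.' ∉ a.toList := by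
  fin_cases ha <;> decide

-- membership decomposition of all_permissions
lemma pv_mem_all (p : String) (hp : p ∈ pvAllPermissions) :
    ∃ r a, r ∈ pvResources ∧ a ∈ pvActions ∧ p = r ++ "." ++ a := by
  simp only [pvAllPermissions, List.mem_flatMap, List.mem_map] at hp
  obtain ⟨r, hr, a, ha, rfl⟩ := hp
  exact ⟨r, a, hr, ha, rfl⟩

-- for a resource name outside the source list, A's startswith filter is empty
lemma pv_filter_start_nil (s : String) (hs : s ∉ pvResources) :
    pvAllPermissions.filter (fun p => PySem.Str.startswith p (s ++ ".")) = [] := by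
  rw [List.filter_eq_nil_iff]
  intro p hp hsw
  obtain ⟨r, a, hr, ha, rfl⟩ := pv_mem_all p hp
  have hpre : (s.toList ++ ['.']) <+: (r.toList ++ '.' :: a.toList) := by
    have := (PySem.Chars.startswith_iff _ _).mp (by simpa using hsw)
    simpa [String.toList_append, List.append_assoc] using this
  exact hs ((String.toList_inj.mp (pv_pfx_dot _ _ _ (pv_res_dotfree r hr) (pv_act_dotfree a ha) hpre)) ▸ hr)

-- for an action name outside the source list, A's endswith filter is empty
lemma pv_filter_end_nil (t : String) (ht : t ∉ pvActions) :
    pvAllPermissions.filter (fun p => PySem.Str.endswith p ("." ++ t)) = [] := by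
  rw [List.filter_eq_nil_iff]
  intro p hp hsw
  obtain ⟨r, a, hr, ha, rfl⟩ := pv_mem_all p hp
  have hsuf : ('.' :: t.toList) <:+ (r.toList ++ '.' :: a.toList) := by
    have := (PySem.Chars.endswith_iff _ _).mp (by simpa using hsw)
    simpa [String.toList_append, List.append_assoc] using this
  exact ht ((String.toList_inj.mp (pv_sfx_dot _ _ _ (pv_res_dotfree r hr) (pv_act_dotfree a ha) hsuf)) ▸ ha)

-- for a resource name in the source list, A's startswith filter is exactly that resource's block
lemma pv_filter_start_mem (r : String) (hr : r ∈ pvResources) :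
    pvAllPermissions.filter (fun p => PySem.Str.startswith p (r ++ ".")) = pvActions.map (fun a => r ++ "." ++ a) := by
  fin_cases hr <;> decide

-- for an action name in the source list, A's endswith filter is exactly that action's column
lemma pv_filter_end_mem (a : String) (ha : a ∈ pvActions) :
    pvAllPermissions.filter (fun p => PySem.Str.endswith p ("." ++ a)) = pvResources.map (fun r => r ++ "." ++ a) := by
  fin_cases ha <;> decide

-- updating with a concatenation = two successive updates (update is a foldl of add)
lemma pv_update_append (acc : PySem.Set String) (xs ys : List String) :
    PySem.Set.update acc (xs ++ ys) = PySem.Set.update (PySem.Set.update acc xs) ys := by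
  simp [PySem.Set.update, List.foldl_append]

-- set(flatMap f l) = fold of per-element updates (B's comprehension as A's loop shape)
lemma pv_ofList_flatMap (l : List String) (f : String → List String) :
    PySem.Set.ofList (l.flatMap f) = l.foldl (fun acc x => PySem.Set.update acc (f x)) PySem.Set.empty := by
  suffices h : ∀ acc : PySem.Set String,
      PySem.Set.update acc (l.flatMap f) = l.foldl (fun acc x => PySem.Set.update acc (f x)) acc from h _
  induction l with
  | nil => intro acc; rfl
  | cons x l ih =>
    intro acc
    rw [List.flatMap_cons, List.foldl_cons, pv_update_append, ih]

-- the per-pattern step of A is the update by B's expand_one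
lemma pv_step_eq (acc : PySem.Set String) (pattern : String) :
    (if pattern = "*.*" then
      PySem.Set.update acc pvAllPermissions
    else if PySem.Str.endswith pattern ".*" then
      let resource := ((PySem.Str.split? pattern ".").getD []).headD ""
      PySem.Set.update acc (pvAllPermissions.filter (fun p => PySem.Str.startswith p (resource ++ ".")))
    else if PySem.Str.startswith pattern "*." then
      let action := ((PySem.Str.split? pattern ".").getD []).getD 1 ""
      PySem.Set.update acc (pvAllPermissions.filter (fun p => PySem.Str.endswith p ("." ++ action)))
    else
      PySem.Set.add acc pattern)
    = PySem.Set.update acc (pvExpandOne pattern) := by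
  unfold pvExpandOne
  by_cases h1 : pattern = "*.*"
  · rw [if_pos h1, if_pos h1]; rfl
  · rw [if_neg h1, if_neg h1]
    by_cases h2 : PySem.Str.endswith pattern ".*" = true
    · rw [if_pos h2, if_pos h2]
      generalize (((PySem.Str.split? pattern ".").getD []).headD "") = s
      dsimp only
      by_cases hm : s ∈ pvResources
      · rw [if_pos (by simpa [List.contains_eq_mem] using hm), pv_filter_start_mem s hm]
      · rw [if_neg (by simpa [List.contains_eq_mem] using hm), pv_filter_start_nil s hm]
    · rw [if_neg h2, if_neg h2]
      by_cases h3 : PySem.Str.startswith pattern "*." = true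
      · rw [if_pos h3, if_pos h3]
        generalize (((PySem.Str.split? pattern ".").getD []).getD 1 "") = t
        dsimp only
        by_cases hm : t ∈ pvActions
        · rw [if_pos (by simpa [List.contains_eq_mem] using hm), pv_filter_end_mem t hm]
        · rw [if_neg (by simpa [List.contains_eq_mem] using hm), pv_filter_end_nil t hm]
      · rw [if_neg h3, if_neg h3]; rfl

-- ===== VERDICT (by name: the statement is the Claim_ definition above) =====
theorem expand_permissions_spec : Claim_equal_expand_permissions := by
  intro permission_patterns _
  unfold Spec_expand_permissions expand_permissions expand_permissions_alt
  rw [pv_ofList_flatMap]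
  exact List.foldl_ext _ _ _ (fun acc p _ => pv_step_eq acc p)
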